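-- pv_equiv track=rewrite | github.com/dapiced/cedd-hackathon | cedd/session_tracker.py | _count_consecutive_high_sessions
-- ===== SOURCE A (Python) =====
-- def _count_consecutive_high_sessions(levels: list[int]) -> int:
--     """Count consecutive high-level sessions (>= Orange) from the most recent."""
--     consecutive_high = 0
--     for lvl in reversed(levels):
--         if lvl >= 2:
--             consecutive_high += 1
--         else:
--             break
--     return consecutive_high
-- ===== SOURCE B (Python) =====
-- def _count_consecutive_high_sessions(levels: list[int]) -> int:
--     """Count consecutive high-level sessions (>= Orange) from the most recent."""
--     run = 0
--     for lvl in levels: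
--         run = run + 1 if lvl >= 2 else 0
--     return run
-- ===== Notes on version B (the rewrite author's own statement) =====
-- stated objective: alternative
-- what changed: Replaced the reversed-iteration loop with an early break by a single forward pass that resets a running counter at each low level and returns the counter at the end.
import Mathlib
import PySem

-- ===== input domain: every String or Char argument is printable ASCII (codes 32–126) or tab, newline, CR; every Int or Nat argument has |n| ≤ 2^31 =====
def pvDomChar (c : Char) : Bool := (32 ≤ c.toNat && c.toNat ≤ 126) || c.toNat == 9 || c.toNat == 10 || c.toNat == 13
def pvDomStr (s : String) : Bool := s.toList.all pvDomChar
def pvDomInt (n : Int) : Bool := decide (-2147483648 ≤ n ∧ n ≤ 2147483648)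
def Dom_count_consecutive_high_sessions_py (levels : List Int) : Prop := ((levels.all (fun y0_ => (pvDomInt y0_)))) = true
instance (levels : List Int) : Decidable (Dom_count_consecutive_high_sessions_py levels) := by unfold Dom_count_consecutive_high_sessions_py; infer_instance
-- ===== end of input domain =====

-- ===== PORT A =====
-- loop over reversed(levels): increment while lvl >= 2, break at first low
def pvLoopA : List Int → Int → Int
  | [], acc => acc
  | l :: ls, acc => if l ≥ 2 then pvLoopA ls (acc + 1) else acc

def count_consecutive_high_sessions_py (levels : List Int) : Int :=
  pvLoopA levels.reverse 0

-- ===== PORT B =====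
-- B: forward pass; reset counter at each low level
def count_consecutive_high_sessions_py_alt (levels : List Int) : Int :=
  levels.foldl (fun run lvl => if lvl ≥ 2 then run + 1 else 0) 0

-- ===== PRECONDITION & SPEC =====
def Spec_count_consecutive_high_sessions_py (levels : List Int) (out : Int) : Prop := out = count_consecutive_high_sessions_py_alt levels
instance (levels : List Int) (out : Int) : Decidable (Spec_count_consecutive_high_sessions_py levels out) := by unfold Spec_count_consecutive_high_sessions_py; infer_instance

-- ===== CLAIM (what is proved, stated in full; the proofs are below) =====
def Claim_equal_count_consecutive_high_sessions_py : Prop := ∀ (levels : List Int), Dom_count_consecutive_high_sessions_py levels → Spec_count_consecutive_high_sessions_py levels (count_consecutive_high_sessions_py levels)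

-- ===== LEMMAS AND PROOFS =====
theorem pvLoopA_shift (rs : List Int) (acc : Int) :
    pvLoopA rs acc = acc + pvLoopA rs 0 := by
  induction rs generalizing acc with
  | nil => simp [pvLoopA]
  | cons r rs ih =>
    simp only [pvLoopA]
    split_ifs
    · rw [ih (acc + 1), ih (0 + 1)]; ring
    · omega

theorem pvLoopA_eq_foldl (rs : List Int) :
    pvLoopA rs 0 = rs.reverse.foldl (fun run lvl => if lvl ≥ 2 then run + 1 else 0) 0 := by
  induction rs with
  | nil => simp [pvLoopA]
  | cons r rs ih =>
    simp only [pvLoopA, List.reverse_cons, List.foldl_append, List.foldl_cons, List.foldl_nil, ← ih]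
    split_ifs
    · rw [pvLoopA_shift rs (0 + 1)]; ring
    · rfl

-- ===== VERDICT (by name: the statement is the Claim_ definition above) =====
theorem count_consecutive_high_sessions_py_spec : Claim_equal_count_consecutive_high_sessions_py := by
  intro levels _
  unfold Spec_count_consecutive_high_sessions_py count_consecutive_high_sessions_py
    count_consecutive_high_sessions_py_alt
  rw [pvLoopA_eq_foldl, List.reverse_reverse]
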